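-- pv_equiv track=rewrite | github.com/netra-systems/zen | app/services/factory_status/git_commit_parser.py | _split_commits
-- ===== SOURCE A (Python) =====
-- from typing import Dict, List, Optional, Tuple
--
-- def _split_commits(output: str) -> List[str]:
--     """Split git log output into individual commits."""
--     commits = []
--     current = []
--     for line in output.strip().split("\n"):
--         if "|" in line and len(current) > 0:
--             commits.append("\n".join(current))
--             current = [line]
--         else:
--             current.append(line)
--     if current:
--         commits.append("\n".join(current))
--     return commits
-- ===== SOURCE B (Python) =====
-- from typing import List
--
-- def _split_commits(output: str) -> List[str]:
--     """Split git log output into individual commits (group-at-a-time: scan to the next boundary, slice)."""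
--     lines = output.strip().split("\n")
--     commits = []
--     i = 0
--     while i < len(lines):
--         j = i + 1
--         while j < len(lines) and "|" not in lines[j]:
--             j += 1
--         commits.append("\n".join(lines[i:j]))
--         i = j
--     return commits
-- ===== Notes on version B (the rewrite author's own statement) =====
-- stated objective: alternative
-- what changed: Replaces A's single accumulate-and-flush loop (a carried line buffer plus a trailing flush) with a group-at-a-time scheme: an inner scan finds the index of the next commit-boundary line, one slice per commit is joined and emitted, with no carried buffer and no final flush.
import Mathlib
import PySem

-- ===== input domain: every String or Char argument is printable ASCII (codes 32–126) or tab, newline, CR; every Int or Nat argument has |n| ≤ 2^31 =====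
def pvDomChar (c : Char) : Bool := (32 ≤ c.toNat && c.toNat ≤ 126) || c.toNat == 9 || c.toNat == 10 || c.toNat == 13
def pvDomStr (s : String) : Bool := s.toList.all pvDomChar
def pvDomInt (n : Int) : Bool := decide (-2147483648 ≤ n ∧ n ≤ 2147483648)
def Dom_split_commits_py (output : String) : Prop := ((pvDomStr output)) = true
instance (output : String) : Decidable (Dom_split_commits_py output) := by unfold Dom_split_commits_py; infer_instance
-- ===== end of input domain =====

-- B replaces A's accumulate-and-flush loop by a group-at-a-time nested scan (find next boundary, slice one commit); objective: alternative decomposition, same cost.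

-- ===== PORT A =====
def split_commits_py (output : String) : List String :=
  -- output.strip().split("\n"); split? is some because the separator "\n" is nonempty
  let lines := (PySem.Str.split? (PySem.Str.strip output) "\n").getD []
  let st := lines.foldl
    (fun (st : List String × List String) line =>
      if PySem.Str.isIn "|" line && decide (0 < st.2.length) then
        (st.1 ++ [PySem.Str.join "\n" st.2], [line])
      else
        (st.1, st.2 ++ [line])) ([], [])
  if st.2.isEmpty then st.1 else st.1 ++ [PySem.Str.join "\n" st.2]

-- ===== PORT B =====
-- inner while loop of Source B: advance j while j < len(lines) and "|" not in lines[j]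
def pvScan (lines : List String) (j : Nat) : Nat :=
  if h : j < lines.length then
    if PySem.Str.isIn "|" (lines[j]'h) then j else pvScan lines (j + 1)
  else j
termination_by lines.length - j

theorem pvScan_ge (lines : List String) (j : Nat) : j ≤ pvScan lines j := by
  fun_induction pvScan lines j with
  | case1 j h hbar => exact le_rfl
  | case2 j h hbar ih => omega
  | case3 j h => exact le_rfl

-- outer while loop of Source B: emit one commit per iteration
def pvOuter (lines : List String) (commits : List String) (i : Nat) : List String :=
  if _h : i < lines.length then
    let j := pvScan lines (i + 1)
    pvOuter lines
      (commits ++ [PySem.Str.join "\n" (PySem.List.slice lines (some (i : Int)) (some (j : Int)))]) j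
  else commits
termination_by lines.length - i
decreasing_by
  have := pvScan_ge lines (i + 1); omega

def split_commits_py_alt (output : String) : List String :=
  pvOuter ((PySem.Str.split? (PySem.Str.strip output) "\n").getD []) [] 0

-- ===== PRECONDITION & SPEC =====
def Spec_split_commits_py (output : String) (out : List String) : Prop := out = split_commits_py_alt output
instance (output : String) (out : List String) : Decidable (Spec_split_commits_py output out) := by unfold Spec_split_commits_py; infer_instance

-- ===== CLAIM (what is proved, stated in full; the proofs are below) =====
def Claim_equal_split_commits_py : Prop := ∀ (output : String), Dom_split_commits_py output → Spec_split_commits_py output (split_commits_py output)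

-- ===== LEMMAS AND PROOFS =====

-- common grouping spec: boundary line at the head, then the lines until the next '|' line
def pvG : List String → List (List String)
  | [] => []
  | l :: ls =>
      (l :: ls.takeWhile (fun x => !PySem.Str.isIn "|" x)) ::
        pvG (ls.dropWhile (fun x => !PySem.Str.isIn "|" x))
termination_by ls => ls.length
decreasing_by
  have := List.length_dropWhile_le (p := fun x => !PySem.Str.isIn "|" x) (l := ls)
  simp only [List.length_cons]; omega

theorem pv_take_takeWhile {α : Type} (p : α → Bool) (xs : List α) :
    xs.take (xs.takeWhile p).length = xs.takeWhile p := by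
  induction xs with
  | nil => rfl
  | cons x xs ih =>
    by_cases h : p x = true
    · simp [h, ih]
    · simp [h]

theorem pv_drop_takeWhile {α : Type} (p : α → Bool) (xs : List α) :
    xs.drop (xs.takeWhile p).length = xs.dropWhile p := by
  induction xs with
  | nil => rfl
  | cons x xs ih =>
    by_cases h : p x = true
    · simp [h, ih]
    · simp [h]

theorem pvScan_eq (lines : List String) (k : Nat) :
    pvScan lines k
      = k + ((lines.drop k).takeWhile (fun x => !PySem.Str.isIn "|" x)).length := by
  fun_induction pvScan lines k with
  | case1 j h hbar =>
    rw [List.drop_eq_getElem_cons h]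
    rw [List.takeWhile_cons]
    simp only [hbar, Bool.not_true]
    simp
  | case2 j h hbar ih =>
    rw [ih, List.drop_eq_getElem_cons h, List.takeWhile_cons]
    simp only [hbar, Bool.not_false, if_true, List.length_cons]
    omega
  | case3 j h =>
    rw [List.drop_eq_nil_of_le (by omega)]
    simp

theorem pvOuter_eq (lines : List String) : ∀ (i : Nat) (commits : List String),
    pvOuter lines commits i = commits ++ (pvG (lines.drop i)).map (PySem.Str.join "\n") := by
  intro i
  induction hfuel : lines.length - i using Nat.strong_induction_on generalizing i with
  | _ fuel ih =>
    intro commits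
    rw [pvOuter]
    by_cases h : i < lines.length
    · simp only [h, dif_pos]
      have hdrop : lines.drop i = lines[i]'h :: lines.drop (i + 1) := List.drop_eq_getElem_cons h
      set p : String → Bool := fun x => !PySem.Str.isIn "|" x with hp
      set t := ((lines.drop (i + 1)).takeWhile p).length with ht
      have hj : pvScan lines (i + 1) = i + 1 + t := pvScan_eq lines (i + 1)
      have htle : t ≤ lines.length - (i + 1) := by
        have h1 := (List.takeWhile_sublist (l := lines.drop (i + 1)) p).length_le
        have h2 : (lines.drop (i + 1)).length = lines.length - (i + 1) := by simp
        omega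
      have hslice : PySem.List.slice lines (some (i : Int)) (some ((pvScan lines (i + 1) : Nat) : Int))
          = lines[i]'h :: (lines.drop (i + 1)).takeWhile p := by
        rw [hj, PySem.List.slice_natCast, show (i + 1 + t) - i = t + 1 by omega, hdrop,
          List.take_succ_cons, ht, pv_take_takeWhile]
      have hdrop2 : lines.drop (i + 1 + t) = (lines.drop (i + 1)).dropWhile p := by
        have hdd := pv_drop_takeWhile p (lines.drop (i + 1))
        rw [List.drop_drop] at hdd
        rw [← ht] at hdd
        rw [← hdd]
      have hG : pvG (lines.drop i)
          = (lines[i]'h :: (lines.drop (i + 1)).takeWhile p) :: pvG ((lines.drop (i + 1)).dropWhile p) := by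
        rw [hdrop, pvG]
      rw [hj] at hslice ⊢
      rw [ih (lines.length - (i + 1 + t)) (by omega) (i + 1 + t) (by omega)]
      rw [hslice, hdrop2, hG]
      simp
    · simp only [h, dif_neg, not_false_iff]
      rw [List.drop_eq_nil_of_le (by omega)]
      simp [pvG]

-- A's loop: from a nonempty current buffer, the flushed fold result is the grouped suffix
theorem pvFoldA (ls : List String) : ∀ (c cur : List String), cur ≠ [] →
    (let st := ls.foldl
      (fun (st : List String × List String) line =>
        if PySem.Str.isIn "|" line && decide (0 < st.2.length) then
          (st.1 ++ [PySem.Str.join "\n" st.2], [line])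
        else
          (st.1, st.2 ++ [line])) (c, cur)
     if st.2.isEmpty then st.1 else st.1 ++ [PySem.Str.join "\n" st.2])
    = c ++ (((cur ++ ls.takeWhile (fun x => !PySem.Str.isIn "|" x)) ::
            pvG (ls.dropWhile (fun x => !PySem.Str.isIn "|" x))).map (PySem.Str.join "\n")) := by
  induction ls with
  | nil =>
    intro c cur h
    simp [pvG, List.isEmpty_eq_false_iff.mpr h]
  | cons l ls ih =>
    intro c cur h
    by_cases hbar : PySem.Str.isIn "|" l = true
    · simp only [List.foldl_cons, hbar, List.length_pos_iff.mpr h, decide_true, Bool.and_self,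
        if_true]
      rw [ih (c ++ [PySem.Str.join "\n" cur]) [l] (by simp)]
      rw [List.takeWhile_cons, List.dropWhile_cons]
      simp only [hbar, Bool.not_true, Bool.false_eq_true, if_false]
      rw [pvG]
      simp
    · have hbar' : PySem.Str.isIn "|" l = false := by
        exact Bool.eq_false_iff.mpr hbar
      simp only [List.foldl_cons, hbar', Bool.false_and, Bool.false_eq_true, if_false]
      rw [ih c (cur ++ [l]) (by simp)]
      rw [List.takeWhile_cons, List.dropWhile_cons]
      simp only [hbar', Bool.not_false, if_true]
      simp

-- ===== VERDICT (by name: the statement is the Claim_ definition above) =====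
theorem split_commits_py_spec : Claim_equal_split_commits_py := by
  intro output _
  unfold Spec_split_commits_py split_commits_py split_commits_py_alt
  cases hl : (PySem.Str.split? (PySem.Str.strip output) "\n").getD [] with
  | nil => rw [pvOuter]; simp
  | cons l ls =>
    rw [pvOuter_eq]
    simp only [List.drop_zero]
    rw [List.foldl_cons]
    simp only [List.length_nil, Nat.lt_irrefl, decide_false, Bool.and_false,
      Bool.false_eq_true, if_false, List.nil_append]
    rw [pvFoldA ls [] [l] (by simp)]
    rw [pvG]
    simp
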